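-- pv_equiv track=rewrite | github.com/joachim-dublineau/Project_question_generation | natixis_utils.py | preprocess_for_TextRank
-- ===== SOURCE A (Python) =====
-- def preprocess_for_TextRank(text):
--     text_clean = ""
--     list_words = text.split(" ")
--     list_replace = ['(', ')', "«", "»", "“", '...', '<', '>', '=', '+', "…", "$", '~', '@', '‘', "’", "”", "'", '"',
--                     '"', '[' ']', '{', '}', '*', '/', ":", "!", ";", ".", "?", ',']
--     for word in list_words:
--         if len(word) > 1:
--             if len(word) < 25:  # if it is too big, it might be the name of a doc, or an hyperlink
--                 temp = ""
--                 for char_ in word: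
--                     if char_ in list_replace:
--                         temp += " " + char_ + " "
--                     else:
--                         temp += char_
--                 text_clean += temp
--         else:
--             text_clean += word
--
--         text_clean += ' '
--     text_clean = text_clean.replace('  ', ' ')
--     return text_clean
-- ===== SOURCE B (Python) =====
-- def preprocess_for_TextRank(text):
--     # One fused pass over the characters with an explicit word buffer (no split()):
--     # a sentinel space flushes the final word; punctuation test via a set.
--     PUNCT = set('()«»“<>=+…$~@‘’”\'""{}*/:!;.?,')
--     pieces = []
--     buf = ""
--     for ch in text + " ":
--         if ch == " ":
--             n = len(buf)
--             if 1 < n < 25: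
--                 pieces.append("".join(" " + c + " " if c in PUNCT else c for c in buf))
--             elif n <= 1:
--                 pieces.append(buf)
--             pieces.append(" ")
--             buf = ""
--         else:
--             buf += ch
--     return "".join(pieces).replace("  ", " ")
-- ===== Notes on version B (the rewrite author's own statement) =====
-- stated objective: alternative
-- what changed: B drops A's split-then-nested-loop structure for one fused left-to-right pass over the characters with an explicit word buffer and a sentinel space that flushes the last word, testing punctuation against a set and joining collected pieces at the end instead of repeated string concatenation.
import Mathlib
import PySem

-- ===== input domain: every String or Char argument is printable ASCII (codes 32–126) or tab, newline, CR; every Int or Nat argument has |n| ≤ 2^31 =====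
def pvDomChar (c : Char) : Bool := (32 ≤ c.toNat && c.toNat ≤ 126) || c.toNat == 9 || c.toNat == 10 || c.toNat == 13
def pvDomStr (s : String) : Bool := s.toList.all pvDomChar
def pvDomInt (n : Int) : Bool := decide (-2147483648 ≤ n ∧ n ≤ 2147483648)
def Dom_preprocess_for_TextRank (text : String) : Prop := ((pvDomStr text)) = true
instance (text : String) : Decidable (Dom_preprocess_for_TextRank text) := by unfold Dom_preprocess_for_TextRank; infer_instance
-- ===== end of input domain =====

-- B replaces A's split-into-words + nested per-character membership scan by ONE fused pass over
-- the character stream with an explicit word buffer (a sentinel space flushes the last word),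
-- testing punctuation against a set (objective: alternative decomposition, single pass, no split).

-- ===== PORT A =====
-- list_replace as in A: a list of strings (the multi-char entries '...' and '[]' never match a single char)
def pvListReplace : List (List Char) :=
  [['('], [')'], ['«'], ['»'], ['“'], ['.', '.', '.'], ['<'], ['>'], ['='], ['+'], ['…'],
   ['$'], ['~'], ['@'], ['‘'], ['’'], ['”'], ['\''], ['"'], ['"'], ['[', ']'], ['{'], ['}'],
   ['*'], ['/'], [':'], ['!'], [';'], ['.'], ['?'], [',']]

def preprocess_for_TextRank (text : String) : String :=
  let list_words := (PySem.Str.split? text " ").getD []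
  let text_clean : List Char := list_words.foldl (fun tc w =>
    let wl := w.toList
    let tc := if wl.length > 1 then
        (if wl.length < 25 then
          tc ++ wl.foldl (fun temp c =>
            if pvListReplace.contains [c] then temp ++ [' ', c, ' '] else temp ++ [c]) []
        else tc)
      else tc ++ wl
    tc ++ [' ']) []
  String.ofList (PySem.Chars.replace text_clean [' ', ' '] [' '])

-- ===== PORT B =====
-- PUNCT = set('()«»“<>=+…$~@‘’”\'""{}*/:!;.?,')
def pvPunct : PySem.Set Char := PySem.Set.ofList "()«»“<>=+…$~@‘’”'\"\"{}*/:!;.?,".toList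

-- the for-loop over text + " " with the word buffer 'buf' and the pieces accumulator
def pvScan : List Char → List (List Char) → List Char → List (List Char)
  | [], pieces, _buf => pieces
  | ch :: rest, pieces, buf =>
    if ch = ' ' then
      let n := buf.length
      let pieces := if 1 < n ∧ n < 25 then
          -- "".join(" " + c + " " if c in PUNCT else c for c in buf)
          pieces ++ [(buf.map (fun c =>
            if PySem.Set.contains pvPunct c then [' ', c, ' '] else [c])).flatten]
        else if n ≤ 1 then pieces ++ [buf] else pieces
      pvScan rest (pieces ++ [[' ']]) []
    else pvScan rest pieces (buf ++ [ch])

def preprocess_for_TextRank_alt (text : String) : String :=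
  let pieces := pvScan (text.toList ++ [' ']) [] []
  String.ofList (PySem.Chars.replace pieces.flatten [' ', ' '] [' '])

-- ===== PRECONDITION & SPEC =====
def Spec_preprocess_for_TextRank (text : String) (out : String) : Prop := out = preprocess_for_TextRank_alt text
instance (text : String) (out : String) : Decidable (Spec_preprocess_for_TextRank text out) := by unfold Spec_preprocess_for_TextRank; infer_instance

-- ===== CLAIM =====
def Claim_equal_preprocess_for_TextRank : Prop := ∀ (text : String), Dom_preprocess_for_TextRank text → Spec_preprocess_for_TextRank text (preprocess_for_TextRank text)

-- ===== LEMMAS AND PROOFS =====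

-- A's membership test agrees with B's set membership on every single character
lemma pvPunct_iff (c : Char) : pvListReplace.contains [c] = PySem.Set.contains pvPunct c := by
  have h : pvPunct = ['(',')','«','»','“','<','>','=','+','…','$','~','@','‘','’','”','\'','"','{','}','*','/',':','!',';','.','?',','] := by decide
  rw [PySem.Set.contains, h]
  simp [pvListReplace]

-- splitting the character stream at spaces, buffer kept in order
def pvSplitSp : List Char → List Char → List (List Char)
  | [], cur => [cur]
  | c :: l, cur => if c = ' ' then cur :: pvSplitSp l [] else pvSplitSp l (cur ++ [c])

lemma pvGo_eq : ∀ (fuel : Nat) (l cur : List Char) (acc : List (List Char)), l.length ≤ fuel →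
    PySem.Chars.splitOn.go [' '] fuel l cur acc = acc.reverse ++ pvSplitSp l cur.reverse := by
  intro fuel
  induction fuel with
  | zero =>
    intro l cur acc h
    have : l = [] := by cases l <;> simp_all
    subst this
    simp [PySem.Chars.splitOn.go, pvSplitSp]
  | succ n ih =>
    intro l cur acc h
    cases l with
    | nil => simp [PySem.Chars.splitOn.go, pvSplitSp]
    | cons c rest =>
      rw [PySem.Chars.splitOn.go]
      by_cases hc : c = ' '
      · subst hc
        simp only [pvSplitSp]
        rw [if_pos (by simp [List.isPrefixOf])]
        rw [ih _ _ _ (by simpa using Nat.le_of_succ_le_succ h)]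
        simp
      · rw [if_neg (by simp [List.isPrefixOf]; exact fun h' => hc h'.symm)]
        rw [ih _ _ _ (by simpa using Nat.le_of_succ_le_succ h)]
        simp [pvSplitSp, hc]

lemma pvSplitOn_eq (l : List Char) : PySem.Chars.splitOn l [' '] = pvSplitSp l [] := by
  rw [PySem.Chars.splitOn, pvGo_eq (l.length + 1) l [] [] (Nat.le_succ _)]
  rfl

-- A's per-word contribution (on a word as a character list)
def pvHAc (wl : List Char) : List Char :=
  (if wl.length > 1 then
      (if wl.length < 25 then
        wl.foldl (fun temp c =>
          if pvListReplace.contains [c] then temp ++ [' ', c, ' '] else temp ++ [c]) []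
      else [])
    else wl) ++ [' ']

-- B's per-word contribution as pieces
def pvPB (wl : List Char) : List (List Char) :=
  (if 1 < wl.length ∧ wl.length < 25 then
      [(wl.map (fun c => if PySem.Set.contains pvPunct c then [' ', c, ' '] else [c])).flatten]
    else if wl.length ≤ 1 then [wl] else []) ++ [[' ']]

lemma pvPB_flatten (wl : List Char) : (pvPB wl).flatten = pvHAc wl := by
  simp only [pvPB, pvHAc]
  have htrans : wl.foldl (fun temp c =>
      if pvListReplace.contains [c] then temp ++ [' ', c, ' '] else temp ++ [c]) [] =
      (wl.map (fun c => if PySem.Set.contains pvPunct c then [' ', c, ' '] else [c])).flatten := by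
    have h : (fun (temp : List Char) (c : Char) =>
        if pvListReplace.contains [c] then temp ++ [' ', c, ' '] else temp ++ [c]) =
        (fun temp c => temp ++ (if PySem.Set.contains pvPunct c then [' ', c, ' '] else [c])) := by
      funext temp c
      rw [pvPunct_iff]
      split_ifs <;> rfl
    rw [h, PySem.List.foldl_append_eq_flatMap, List.flatMap_def]
    rfl
  by_cases h1 : wl.length > 1
  · by_cases h2 : wl.length < 25
    · rw [if_pos ⟨h1, h2⟩, if_pos h1, if_pos h2, htrans]
      simp
    · rw [if_neg (by omega), if_neg (by omega), if_pos h1, if_neg h2]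
      simp
  · rw [if_neg (by omega), if_pos (by omega), if_neg h1]
    simp

-- flushing the buffer appends exactly B's per-word pieces
lemma pvFlush_eq (pieces : List (List Char)) (buf : List Char) :
    (if 1 < buf.length ∧ buf.length < 25 then
        pieces ++ [(buf.map (fun c =>
          if PySem.Set.contains pvPunct c then [' ', c, ' '] else [c])).flatten]
      else if buf.length ≤ 1 then pieces ++ [buf] else pieces) ++ [[' ']] =
    pieces ++ pvPB buf := by
  simp only [pvPB]
  split_ifs <;> simp

-- B's scan over the sentinel-terminated stream produces the per-word pieces of the split
lemma pvScan_eq : ∀ (l : List Char) (pieces : List (List Char)) (buf : List Char),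
    pvScan (l ++ [' ']) pieces buf = pieces ++ ((pvSplitSp l buf).map pvPB).flatten := by
  intro l
  induction l with
  | nil =>
    intro pieces buf
    show pvScan [' '] pieces buf = _
    simp only [pvScan]
    rw [pvFlush_eq]
    simp [pvSplitSp]
  | cons c rest ih =>
    intro pieces buf
    by_cases hc : c = ' '
    · subst hc
      show pvScan (' ' :: (rest ++ [' '])) pieces buf = _
      simp only [pvScan]
      rw [pvFlush_eq, ih]
      simp [pvSplitSp]
    · show pvScan (c :: (rest ++ [' '])) pieces buf = _
      simp only [pvScan, if_neg hc]
      rw [ih]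
      simp [pvSplitSp, hc]

lemma pvFlatten_map_flatten {β : Type} (s : List (List Char)) (f : List Char → List (List β)) :
    ((s.map f).flatten).flatten = s.flatMap (fun w => (f w).flatten) := by
  induction s with
  | nil => rfl
  | cons a l ih => simp [List.flatMap_cons, List.flatten_append, ih]

-- ===== VERDICT =====
theorem preprocess_for_TextRank_spec : Claim_equal_preprocess_for_TextRank := by
  intro text _
  show preprocess_for_TextRank text = preprocess_for_TextRank_alt text
  have h2 : PySem.Chars.split? text.toList [' '] = some (pvSplitSp text.toList []) := by
    rw [PySem.Chars.split?]
    simp [pvSplitOn_eq]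
  have hws : ((PySem.Str.split? text " ").getD []).map String.toList = pvSplitSp text.toList [] := by
    have hbr := PySem.Str.split?_map text " "
    have hsep : (" " : String).toList = [' '] := rfl
    rw [hsep, h2] at hbr
    cases hsp : PySem.Str.split? text " " with
    | none => rw [hsp] at hbr; simp at hbr
    | some ws =>
      rw [hsp] at hbr
      simp only [Option.map_some, Option.some.injEq] at hbr
      simpa using hbr
  have hA : ∀ (ws : List String),
      ws.foldl (fun tc w =>
        let wl := w.toList
        let tc := if wl.length > 1 then
            (if wl.length < 25 then
              tc ++ wl.foldl (fun temp c =>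
                if pvListReplace.contains [c] then temp ++ [' ', c, ' '] else temp ++ [c]) []
            else tc)
          else tc ++ wl
        tc ++ [' ']) [] = ws.flatMap (fun w => pvHAc w.toList) := by
    intro ws
    have h : (fun (tc : List Char) (w : String) =>
        let wl := w.toList
        let tc := if wl.length > 1 then
            (if wl.length < 25 then
              tc ++ wl.foldl (fun temp c =>
                if pvListReplace.contains [c] then temp ++ [' ', c, ' '] else temp ++ [c]) []
            else tc)
          else tc ++ wl
        tc ++ [' ']) = (fun tc w => tc ++ pvHAc w.toList) := by
      funext tc w
      simp only [pvHAc]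
      split_ifs <;> simp
    rw [h, PySem.List.foldl_append_eq_flatMap]
    rfl
  simp only [preprocess_for_TextRank, preprocess_for_TextRank_alt]
  rw [hA, pvScan_eq]
  simp only [List.nil_append]
  congr 1
  rw [pvFlatten_map_flatten, ← hws, List.flatMap_map]
  simp only [pvPB_flatten]
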